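-- pv_equiv track=rewrite | github.com/bmarchand/rna_small_parsimony | rnadist/utils.py | filter_dot_only
-- ===== SOURCE A (Python) =====
-- def filter_dot_only(input_structures):
--
--     dot_positions = []
--
--     N = len(input_structures[0])
--
--     for k in range(N):
--         all_points = True
--         for structure in input_structures:
--             if structure[k]!='.':
--                 all_points = False
--                 break
--
--         if all_points:
--             dot_positions.append(k)
--
--     new_structures = []
--     for structure in input_structures:
--         l = list(structure)
--         for k in dot_positions:
--             l[k]=''
--
--         new_structures.append(''.join(l))
--
--     return dot_positions, new_structures
-- ===== SOURCE B (Python) =====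
-- def filter_dot_only(input_structures):
--     # One row-wise pass builds the union of positions holding a non-dot character;
--     # the all-dot columns are the positions of range(N) outside that union.
--     N = len(input_structures[0])
--     non_dot = set()
--     for s in input_structures:
--         for k, ch in enumerate(s):
--             if ch != '.':
--                 non_dot.add(k)
--     dot_positions = [k for k in range(N) if k not in non_dot]
--     # Rebuild each structure by concatenating the slices between consecutive dot positions.
--     new_structures = []
--     for s in input_structures:
--         parts = []
--         prev = 0
--         for k in dot_positions:
--             parts.append(s[prev:k])
--             prev = k + 1
--         parts.append(s[prev:])
--         new_structures.append(''.join(parts))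
--     return dot_positions, new_structures
-- ===== Notes on version B (the rewrite author's own statement) =====
-- stated objective: alternative
-- what changed: B replaces A's column-major probing (inner loop over the structures at each index, with early break) by a single row-major pass accumulating the set of non-dot positions, and rebuilds each structure by concatenating the slices between consecutive dot positions instead of blanking list cells and re-joining.
import Mathlib
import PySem

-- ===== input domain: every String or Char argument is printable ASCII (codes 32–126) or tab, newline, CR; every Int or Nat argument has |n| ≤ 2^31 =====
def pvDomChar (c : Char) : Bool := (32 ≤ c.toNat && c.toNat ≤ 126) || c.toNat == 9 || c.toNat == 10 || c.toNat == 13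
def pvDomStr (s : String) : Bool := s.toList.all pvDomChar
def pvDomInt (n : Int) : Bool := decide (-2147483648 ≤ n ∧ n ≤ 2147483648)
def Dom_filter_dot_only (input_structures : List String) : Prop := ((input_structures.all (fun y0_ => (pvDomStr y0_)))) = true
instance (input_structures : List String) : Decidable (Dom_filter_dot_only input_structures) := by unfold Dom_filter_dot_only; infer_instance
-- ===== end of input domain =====

-- B replaces A's column-major probing by one row-major pass accumulating the set of
-- non-dot positions, and rebuilds rows by concatenating slices between dot positions;
-- objective: alternative, same cost.

-- ===== PORT A =====
-- inner loop 'for structure in input_structures: if structure[k] != '.': break';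
-- structure[k] out of range is an IndexError (excluded by Pre_): the port returns false there.
def pvAllPoints (structures : List String) (k : Int) : Bool :=
  match structures with
  | [] => true
  | s :: rest =>
    match PySem.Str.pyGet? s k with
    | some c => if c ≠ '.' then false else pvAllPoints rest k
    | none => false

def filter_dot_only (input_structures : List String) : List Int × List String :=
  -- N = len(input_structures[0]); input_structures[0] on [] raises IndexError (excluded by Pre_)
  let N : Int := PySem.Str.len (input_structures.headD "")
  let dot_positions : List Int :=
    (PySem.List.pyRange 0 N 1).foldl
      (fun acc k => if pvAllPoints input_structures k then acc ++ [k] else acc) []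
  let new_structures : List String :=
    input_structures.foldl (fun acc st =>
      let l : List String := st.toList.map (fun c => String.singleton c)
      let l2 : List String := dot_positions.foldl (fun l k => l.set k.toNat "") l
      acc ++ [PySem.Str.join "" l2]) []
  (dot_positions, new_structures)

-- ===== PORT B =====
def filter_dot_only_alt (input_structures : List String) : List Int × List String :=
  let N : Int := PySem.Str.len (input_structures.headD "")
  -- one pass over the rows: union of the positions carrying a non-dot character
  let non_dot : PySem.Set Int :=
    input_structures.foldl (fun nd s =>
      (PySem.List.enumerate s.toList).foldl
        (fun nd p => if p.2 ≠ '.' then PySem.Set.add nd p.1 else nd) nd)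
      PySem.Set.empty
  let dot_positions : List Int :=
    (PySem.List.pyRange 0 N 1).filter (fun k => !(PySem.Set.contains non_dot k))
  -- rebuild each row from the slices between consecutive dot positions
  let new_structures : List String :=
    input_structures.foldl (fun acc s =>
      let pp : List String × Int :=
        dot_positions.foldl (fun pp k =>
          (pp.1 ++ [PySem.Str.slice s (some pp.2) (some k)], k + 1)) ([], 0)
      acc ++ [PySem.Str.join "" (pp.1 ++ [PySem.Str.slice s (some pp.2) none])]) []
  (dot_positions, new_structures)

-- ===== PRECONDITION & SPEC =====
-- Pre_ is exactly where Python A returns: the list is nonempty and, whenever scanning column k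
-- (k < len of the first structure) reaches a structure shorter than k+1 (which would be an
-- IndexError), an earlier structure already broke the scan with a non-dot character at k.
def Pre_filter_dot_only (input_structures : List String) : Prop :=
  input_structures ≠ [] ∧
  ∀ k ∈ List.range (input_structures.headD "").toList.length,
    ∀ j ∈ List.range input_structures.length,
      (input_structures.getD j "").toList.length ≤ k →
        ∃ i ∈ List.range j, k < (input_structures.getD i "").toList.length ∧
          (input_structures.getD i "").toList.getD k '.' ≠ '.'
instance (input_structures : List String) : Decidable (Pre_filter_dot_only input_structures) := by
  unfold Pre_filter_dot_only; infer_instance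

def pvWitness_filter_dot_only : List String := ["(.).", "..)."]

def Spec_filter_dot_only (input_structures : List String) (out : List Int × List String) : Prop := out = filter_dot_only_alt input_structures
instance (input_structures : List String) (out : List Int × List String) : Decidable (Spec_filter_dot_only input_structures out) := by unfold Spec_filter_dot_only; infer_instance

-- ===== CLAIM (what is proved, stated in full; the proofs are below) =====
def Claim_equal_filter_dot_only : Prop := ∀ (input_structures : List String), Dom_filter_dot_only input_structures → Pre_filter_dot_only input_structures → Spec_filter_dot_only input_structures (filter_dot_only input_structures)

-- ===== LEMMAS AND PROOFS =====

theorem pvAllPoints_eq (xs : List String) (k : Nat) :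
    pvAllPoints xs (k : Int) = xs.all (fun s => s.toList[k]? == some '.') := by
  induction xs with
  | nil => rfl
  | cons s rest ih =>
    simp only [pvAllPoints, PySem.Str.pyGet?_natCast, List.all_cons]
    cases hg : s.toList[k]? with
    | none => simp [hg]
    | some c =>
      by_cases hc : c = '.'
      · simp [hg, hc, ih]
      · simp [hg, hc]

-- A-side rebuild machinery
theorem foldl_set_eq_mapIdx (dN : List Nat) :
    ∀ (l : List String),
      dN.foldl (fun l k => l.set k "") l
        = l.mapIdx (fun i x => if dN.contains i then "" else x) := by
  induction dN with
  | nil =>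
    intro l
    simp only [List.foldl_nil]
    apply List.ext_getElem <;> simp
  | cons d rest ih =>
    intro l
    rw [List.foldl_cons, ih]
    apply List.ext_getElem
    · simp
    · intro j h1 h2
      simp only [List.getElem_mapIdx, List.getElem_set, List.contains_cons]
      by_cases hr : j ∈ rest
      · simp [hr]
      · by_cases hd : d = j
        · simp [hd, hr]
        · simp [hd, hr, Ne.symm hd]

theorem chars_join_nil_flatten :
    ∀ (ps : List (List Char)), PySem.Chars.join [] ps = ps.flatten := by
  intro ps
  induction ps with
  | nil => simp [PySem.Chars.join_nil]
  | cons p rest ih =>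
    cases rest with
    | nil => simp [PySem.Chars.join_singleton]
    | cons q rest' =>
      rw [PySem.Chars.join_cons_cons, ih]
      simp

theorem flatten_mapIdx_eq_filter (g : Int → Bool) :
    ∀ (cs : List Char) (s : Int),
      (List.mapIdx (fun i x => if g (s + (i : Int)) then [] else x) (cs.map (fun c => [c]))).flatten
        = ((PySem.List.enumerate cs s).filter (fun p => ! g p.1)).map (·.2) := by
  intro cs
  induction cs with
  | nil => intro s; rfl
  | cons c cs ih =>
    intro s
    rw [List.map_cons, List.mapIdx_cons, PySem.List.enumerate_cons]
    simp only [List.flatten_cons, List.filter_cons]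
    have hfun : (List.mapIdx (fun i x => if g (s + ((i+1 : Nat) : Int)) then [] else x) (cs.map (fun c => [c])))
        = (List.mapIdx (fun i x => if g ((s+1) + (i : Int)) then [] else x) (cs.map (fun c => [c]))) := by
      congr 1
      funext i x
      congr 2
      push_cast
      ring
    rw [hfun, ih (s+1)]
    by_cases hg : g s = true
    · simp [hg]
    · simp [hg]

theorem map_mapIdx' {α β γ : Type} (l : List α) (f : Nat → α → β) (t : β → γ) :
    (l.mapIdx f).map t = l.mapIdx (fun i x => t (f i x)) := by
  apply List.ext_getElem <;> simp

theorem mapIdx_map' {α β γ : Type} (l : List α) (m : α → β) (f : Nat → β → γ) :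
    (l.map m).mapIdx f = l.mapIdx (fun i x => f i (m x)) := by
  apply List.ext_getElem <;> simp

-- B-side: membership in the accumulated non-dot set
theorem contains_add_eq (s : PySem.Set Int) (x y : Int) :
    PySem.Set.contains (PySem.Set.add s x) y = (PySem.Set.contains s y || y == x) := by
  rw [Bool.eq_iff_iff, PySem.Set.contains_iff, PySem.Set.mem_add, Bool.or_eq_true,
    PySem.Set.contains_iff, beq_iff_eq]

theorem contains_inner_fold (k : Int) :
    ∀ (ps : List (Int × Char)) (nd : PySem.Set Int),
      PySem.Set.contains
        (ps.foldl (fun nd p => if p.2 ≠ '.' then PySem.Set.add nd p.1 else nd) nd) k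
      = (PySem.Set.contains nd k || ps.any (fun p => p.2 ≠ '.' && p.1 == k)) := by
  intro ps
  induction ps with
  | nil => intro nd; simp
  | cons p ps ih =>
    intro nd
    rw [List.foldl_cons, List.any_cons, ih]
    by_cases hp : p.2 = '.'
    · simp [hp]
    · simp only [hp, ne_eq, not_false_eq_true, if_pos, decide_true, Bool.true_and,
        contains_add_eq]
      cases PySem.Set.contains nd k <;> cases hk : (k == p.1) <;>
        simp_all [BEq.comm]

theorem contains_outer_fold (k : Int) :
    ∀ (xs : List String) (nd : PySem.Set Int),
      PySem.Set.contains
        (xs.foldl (fun nd s =>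
          (PySem.List.enumerate s.toList).foldl
            (fun nd p => if p.2 ≠ '.' then PySem.Set.add nd p.1 else nd) nd) nd) k
      = (PySem.Set.contains nd k ||
          xs.any (fun s => (PySem.List.enumerate s.toList).any (fun p => p.2 ≠ '.' && p.1 == k))) := by
  intro xs
  induction xs with
  | nil => intro nd; simp
  | cons s xs ih =>
    intro nd
    rw [List.foldl_cons, List.any_cons, ih, contains_inner_fold]
    cases PySem.Set.contains nd k <;> simp

-- casts: membership of a cast natural in a cast list
theorem contains_cast (ds : List Nat) (m : Nat) :
    ((ds.map (fun (n : Nat) => (n : Int))).contains ((m : Nat) : Int)) = ds.contains m := by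
  simp only [List.contains_eq_mem, List.mem_map, decide_eq_decide]
  constructor
  · rintro ⟨d, hd, hcast⟩
    have : d = m := by exact_mod_cast hcast
    subst this; exact hd
  · intro h; exact ⟨m, h, rfl⟩

-- the enumerate-based any, read off the characters
theorem any_enumerate_eq (cs : List Char) (i : Nat) :
    (PySem.List.enumerate cs).any (fun p => p.2 ≠ '.' && p.1 == (i : Int))
      = (match cs[i]? with | some c => decide (c ≠ '.') | none => false) := by
  have key : ∀ p ∈ PySem.List.enumerate cs, (decide (p.2 ≠ '.') && p.1 == (i : Int)) = true →
      ∃ _ : i < cs.length, cs[i] ≠ '.' := by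
    intro p hp hpp
    obtain ⟨j, hj, rfl⟩ := (PySem.List.mem_enumerate_iff _ _ _).mp hp
    simp only [Bool.and_eq_true, beq_iff_eq, zero_add, decide_eq_true_eq] at hpp
    have hji : j = i := by exact_mod_cast hpp.2
    subst hji
    exact ⟨hj, hpp.1⟩
  rcases hg : cs[i]? with _ | c
  · have hlen : cs.length ≤ i := by
      by_contra h
      push_neg at h
      rw [List.getElem?_eq_getElem h] at hg
      cases hg
    show _ = false
    rw [Bool.eq_false_iff]
    intro h
    obtain ⟨p, hp, hpp⟩ := List.any_eq_true.mp h
    obtain ⟨hi, -⟩ := key p hp hpp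
    omega
  · have hi : i < cs.length := by
      by_contra h
      push_neg at h
      rw [List.getElem?_eq_none h] at hg
      cases hg
    have hci : cs[i] = c := by
      rw [List.getElem?_eq_getElem hi] at hg
      exact Option.some.inj hg
    show _ = decide (c ≠ '.')
    cases hc : decide (c ≠ '.') with
    | false =>
      rw [Bool.eq_false_iff]
      intro h
      obtain ⟨p, hp, hpp⟩ := List.any_eq_true.mp h
      obtain ⟨h5, hne2⟩ := key p hp hpp
      rw [hci] at hne2
      exact (of_decide_eq_false hc) hne2
    | true =>
      apply List.any_eq_true.mpr
      refine ⟨((i : Int), cs[i]), (PySem.List.mem_enumerate_iff _ _ _).mpr ⟨i, hi, by simp⟩, ?_⟩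
      simp [hci, of_decide_eq_true hc]

-- ===== B-side rebuild: slice segments =====
def pvSegsStr (s : String) : Nat → List Nat → List String
  | _, [] => []
  | prev, k :: ks => PySem.Str.slice s (some (prev : Int)) (some (k : Int)) :: pvSegsStr s (k+1) ks

def pvLastP : Nat → List Nat → Nat
  | prev, [] => prev
  | _, k :: ks => pvLastP (k+1) ks

theorem foldl_slices (s : String) :
    ∀ (dN : List Nat) (init : List String) (prev : Nat),
      (dN.map (fun (n : Nat) => (n : Int))).foldl
        (fun (pp : List String × Int) k =>
          (pp.1 ++ [PySem.Str.slice s (some pp.2) (some k)], k + 1)) (init, (prev : Int))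
      = (init ++ pvSegsStr s prev dN, ((pvLastP prev dN : Nat) : Int)) := by
  intro dN
  induction dN with
  | nil => intro init prev; simp [pvSegsStr, pvLastP]
  | cons k ks ih =>
    intro init prev
    simp only [List.map_cons, List.foldl_cons]
    have : ((k : Int) + 1) = (((k + 1 : Nat)) : Int) := by push_cast; omega
    rw [this, ih]
    simp [pvSegsStr, pvLastP]

-- char-level segments (with the trailing slice folded in)
def pvSegsC (cs : List Char) : Nat → List Nat → List (List Char)
  | prev, [] => [cs.drop prev]
  | prev, k :: ks => (cs.drop prev).take (k - prev) :: pvSegsC cs (k+1) ks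

theorem segs_toList (s : String) :
    ∀ (dN : List Nat) (prev : Nat),
      ((pvSegsStr s prev dN).map String.toList) ++ [s.toList.drop (pvLastP prev dN)]
        = pvSegsC s.toList prev dN := by
  intro dN
  induction dN with
  | nil => intro prev; simp [pvSegsStr, pvLastP, pvSegsC]
  | cons k ks ih =>
    intro prev
    simp only [pvSegsStr, pvSegsC, pvLastP, List.map_cons, List.cons_append]
    rw [ih]
    congr 1
    rw [PySem.Str.toList_slice, PySem.Chars.slice_eq_listSlice]
    exact PySem.List.slice_natCast _ _ _

-- main segment lemma: concatenating the slices = dropping the listed indices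
theorem segsC_flatten (cs : List Char) :
    ∀ (ds : List Nat) (prev : Nat), ds.Pairwise (· < ·) → (∀ d ∈ ds, prev ≤ d) →
      (pvSegsC cs prev ds).flatten
        = ((PySem.List.enumerate (cs.drop prev) (prev : Int)).filter
            (fun p => !((ds.map (fun (n : Nat) => (n : Int))).contains p.1))).map (·.2) := by
  intro ds
  induction ds with
  | nil =>
    intro prev _ _
    simp [pvSegsC, PySem.List.map_snd_enumerate]
  | cons k ks ih =>
    intro prev hpw hge
    have hprevk : prev ≤ k := hge k (by simp)
    have hkks : ∀ d ∈ ks, k < d := fun d hd => (List.pairwise_cons.mp hpw).1 d hd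
    have hsplit : cs.drop prev = (cs.drop prev).take (k - prev) ++ cs.drop k := by
      conv_lhs => rw [← List.take_append_drop (k - prev) (cs.drop prev)]
      congr 1
      rw [List.drop_drop]
      congr 1
      omega
    simp only [pvSegsC, List.flatten_cons]
    rw [ih (k+1) (List.pairwise_cons.mp hpw).2 (fun d hd => hkks d hd)]
    conv_rhs => rw [hsplit]
    rw [PySem.List.enumerate_append, List.filter_append, List.map_append]
    congr 1
    · -- first piece: indices < k, all kept
      have hkeep : ∀ p ∈ PySem.List.enumerate ((cs.drop prev).take (k - prev)) (prev : Int),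
          (!((((k :: ks).map (fun (n : Nat) => (n : Int)))).contains p.1)) = true := by
        intro p hp
        obtain ⟨j, hj, rfl⟩ := (PySem.List.mem_enumerate_iff _ _ _).mp hp
        have hjlt : j < k - prev := by
          have h2 := hj
          rw [List.length_take] at h2
          omega
        have hcast : ((prev : Int) + (j : Int)) = (((prev + j : Nat)) : Int) := by push_cast; ring
        dsimp only
        rw [hcast, contains_cast]
        have hnotmem : (prev + j) ∉ k :: ks := by
          intro hmem
          rcases List.mem_cons.mp hmem with h | h
          · omega
          · have := hkks _ h; omega
        simp [List.contains_eq_mem, hnotmem]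
      rw [List.filter_eq_self.mpr hkeep, PySem.List.map_snd_enumerate]
    · -- second piece
      rcases hdk : cs.drop k with _ | ⟨c, rest⟩
      · have hlenk : cs.length ≤ k := by
          have h2 := congrArg List.length hdk
          rw [List.length_drop] at h2
          simp only [List.length_nil] at h2
          omega
        have h1 : cs.drop (k+1) = [] := List.drop_eq_nil_of_le (by omega)
        rw [h1]
        simp
      · have hk : k < cs.length := by
          by_contra h
          push_neg at h
          rw [List.drop_eq_nil_of_le h] at hdk
          cases hdk
        have hlen : ((cs.drop prev).take (k - prev)).length = k - prev := by
          rw [List.length_take, List.length_drop]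
          omega
        rw [hlen]
        have hoff2 : ((prev : Int) + ((k - prev : Nat) : Int)) = ((k : Nat) : Int) := by
          push_cast; omega
        rw [hoff2]
        have hrest : rest = cs.drop (k+1) := by
          have h2 : cs.drop (k+1) = (cs.drop k).drop 1 := by
            rw [List.drop_drop]
          rw [h2, hdk]
          rfl
        rw [PySem.List.enumerate_cons, List.filter_cons]
        have hcself : (!(((k :: ks).map (fun (n : Nat) => (n : Int))).contains ((k : Nat) : Int))) = false := by
          rw [contains_cast]
          simp [List.contains_eq_mem]
        rw [hcself]
        simp only [Bool.false_eq_true, if_false]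
        rw [← hrest]
        have hcast1 : (((k + 1 : Nat)) : Int) = ((k : Nat) : Int) + 1 := by push_cast; ring
        rw [hcast1]
        congr 1
        apply List.filter_congr
        intro p hp
        obtain ⟨j, hj, rfl⟩ := (PySem.List.mem_enumerate_iff _ _ _).mp hp
        have hcast2 : (((k : Nat) : Int) + 1 + (j : Int)) = (((k + 1 + j : Nat)) : Int) := by
          push_cast; ring
        dsimp only
        rw [hcast2, contains_cast, contains_cast]
        have hne2 : (k + 1 + j) ≠ k := by omega
        have hiff : ((k :: ks).contains (k + 1 + j)) = (ks.contains (k + 1 + j)) := by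
          simp [List.contains_cons, hne2]
        rw [hiff]

-- the all-dot columns of xs, as naturals
def pvDN (xs : List String) : List Nat :=
  (List.range (xs.headD "").toList.length).filter
    (fun k => xs.all (fun s => s.toList[k]? == some '.'))

-- A's dot positions = the filtered range
theorem A_dots (xs : List String) (N : Nat) :
    (PySem.List.pyRange 0 (N : Int) 1).foldl
        (fun acc k => if pvAllPoints xs k then acc ++ [k] else acc) []
      = (((List.range N).filter (fun k => xs.all (fun s => s.toList[k]? == some '.'))).map
          (fun (n : Nat) => (n : Int))) := by
  rw [PySem.List.pyRange_zero_natCast, PySem.List.foldl_append_if_eq_filter, List.nil_append,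
    List.filter_map]
  congr 1
  apply List.filter_congr
  intro k _
  exact pvAllPoints_eq xs k

-- A's per-row rebuild, as an index filter
theorem A_row (s : String) (dN : List Nat) :
    (PySem.Str.join ""
        ((dN.map (fun (n : Nat) => (n : Int))).foldl (fun l k => l.set k.toNat "")
          (s.toList.map (fun c => String.singleton c)))).toList
      = ((PySem.List.enumerate s.toList).filter
          (fun p => !((dN.map (fun (n : Nat) => (n : Int))).contains p.1))).map (·.2) := by
  have hfold : (dN.map (fun (n : Nat) => (n : Int))).foldl (fun l k => l.set k.toNat "")
      (s.toList.map (fun c => String.singleton c))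
      = dN.foldl (fun l k => l.set k "") (s.toList.map (fun c => String.singleton c)) := by
    rw [List.foldl_map]
    simp
  rw [hfold, foldl_set_eq_mapIdx, PySem.Str.toList_join]
  have hnil : ("" : String).toList = ([] : List Char) := rfl
  rw [hnil, chars_join_nil_flatten, map_mapIdx', mapIdx_map']
  have hfun : (s.toList.mapIdx (fun i x =>
        String.toList (if dN.contains i then "" else String.singleton x)))
      = (List.mapIdx (fun i x =>
          if (fun z : Int => (dN.map (fun (n : Nat) => (n : Int))).contains z) ((0 : Int) + (i : Int)) then [] else x)
          (s.toList.map (fun c => [c]))) := by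
    rw [mapIdx_map']
    congr 1
    funext i x
    dsimp only
    have h2 : ((dN.map (fun (n : Nat) => (n : Int))).contains ((0 : Int) + (i : Int))) = dN.contains i := by
      have hcast : ((0 : Int) + (i : Int)) = ((i : Nat) : Int) := by omega
      rw [hcast, contains_cast]
    simp only [h2]
    by_cases hb : i ∈ dN <;> simp [hb]
  rw [hfun, flatten_mapIdx_eq_filter]

-- B's per-row rebuild, as the same index filter
theorem B_row (s : String) (dN : List Nat) (hpw : dN.Pairwise (· < ·)) :
    (PySem.Str.join "" (pvSegsStr s 0 dN ++
        [PySem.Str.slice s (some ((pvLastP 0 dN : Nat) : Int)) none])).toList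
      = ((PySem.List.enumerate s.toList).filter
          (fun p => !((dN.map (fun (n : Nat) => (n : Int))).contains p.1))).map (·.2) := by
  rw [PySem.Str.toList_join]
  have hnil : ("" : String).toList = ([] : List Char) := rfl
  rw [hnil, chars_join_nil_flatten, List.map_append]
  have hslice : (PySem.Str.slice s (some ((pvLastP 0 dN : Nat) : Int)) none).toList
      = s.toList.drop (pvLastP 0 dN) := by
    rw [PySem.Str.toList_slice, PySem.Chars.slice_eq_listSlice]
    exact PySem.List.slice_from_natCast _ _
  simp only [List.map_cons, List.map_nil, hslice]
  rw [segs_toList s dN 0]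
  have h2 := segsC_flatten s.toList dN 0 hpw (fun d _ => Nat.zero_le d)
  simpa using h2

-- the two per-row rebuilds agree
theorem row_eq (s : String) (dN : List Nat) (hpw : dN.Pairwise (· < ·)) :
    PySem.Str.join ""
        ((dN.map (fun (n : Nat) => (n : Int))).foldl (fun l k => l.set k.toNat "")
          (s.toList.map (fun c => String.singleton c)))
      = PySem.Str.join ""
          (((dN.map (fun (n : Nat) => (n : Int))).foldl (fun (pp : List String × Int) k =>
              (pp.1 ++ [PySem.Str.slice s (some pp.2) (some k)], k + 1)) ([], 0)).1 ++
            [PySem.Str.slice s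
              (some (((dN.map (fun (n : Nat) => (n : Int))).foldl
                (fun (pp : List String × Int) k =>
                  (pp.1 ++ [PySem.Str.slice s (some pp.2) (some k)], k + 1)) ([], 0)).2)) none]) := by
  have hinj : ∀ a b : String, a.toList = b.toList → a = b := fun a b h => by
    have h2 := congrArg String.ofList h
    simpa using h2
  have h0 : (([], (0 : Int)) : List String × Int) = (([], ((0 : Nat) : Int)) : List String × Int) := by
    norm_num
  apply hinj
  rw [h0, foldl_slices s dN [] 0, A_row s dN]
  dsimp only
  rw [List.nil_append]
  exact (B_row s dN hpw).symm

-- under Pre_, a column below N is all-dot iff no structure carries a non-dot there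
theorem colQ (xs : List String) (hpre : Pre_filter_dot_only xs) (k : Nat)
    (hk : k < (xs.headD "").toList.length) :
    (xs.any (fun s => match s.toList[k]? with | some c => decide (c ≠ '.') | none => false))
      = !(xs.all (fun s => s.toList[k]? == some '.')) := by
  obtain ⟨hne, hshield⟩ := hpre
  by_cases hshort : ∃ j < xs.length, (xs.getD j "").toList.length ≤ k
  · obtain ⟨j, hj, hjshort⟩ := hshort
    obtain ⟨i, hi, hilen, hidot⟩ :=
      hshield k (List.mem_range.mpr hk) j (List.mem_range.mpr hj) hjshort
    have hiL : i < xs.length := lt_trans (List.mem_range.mp hi) hj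
    have hmem : xs.getD i "" ∈ xs := by
      rw [List.getD_eq_getElem?_getD, List.getElem?_eq_getElem hiL]
      exact List.getElem_mem _
    have hsome : (xs.getD i "").toList[k]? = some ((xs.getD i "").toList.getD k '.') := by
      rw [List.getD_eq_getElem _ _ hilen, List.getElem?_eq_getElem hilen]
    have hleft : (xs.any (fun s => match s.toList[k]? with
        | some c => decide (c ≠ '.') | none => false)) = true := by
      apply List.any_eq_true.mpr
      refine ⟨xs.getD i "", hmem, ?_⟩
      rw [hsome]
      simpa using hidot
    have hright : (xs.all (fun s => s.toList[k]? == some '.')) = false := by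
      apply List.all_eq_false.mpr
      refine ⟨xs.getD i "", hmem, ?_⟩
      intro hcontr
      rw [hsome, beq_iff_eq] at hcontr
      exact hidot (Option.some.inj hcontr)
    rw [hleft, hright]
    rfl
  · push_neg at hshort
    have hall : ∀ s ∈ xs, k < s.toList.length := by
      intro s hs
      obtain ⟨j, hj, rfl⟩ := List.getElem_of_mem hs
      have h2 := hshort j hj
      rw [List.getD_eq_getElem?_getD, List.getElem?_eq_getElem hj] at h2
      simpa using h2
    cases hA : xs.all (fun s => s.toList[k]? == some '.') with
    | false =>
      obtain ⟨s, hs, hsp⟩ := List.all_eq_false.mp hA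
      have hk2 : k < s.toList.length := hall s hs
      rw [List.getElem?_eq_getElem hk2] at hsp
      have h3 : (xs.any (fun s => match s.toList[k]? with
          | some c => decide (c ≠ '.') | none => false)) = true := by
        apply List.any_eq_true.mpr
        refine ⟨s, hs, ?_⟩
        rw [List.getElem?_eq_getElem hk2]
        simpa using hsp
      rw [h3]
      rfl
    | true =>
      have h3 : (xs.any (fun s => match s.toList[k]? with
          | some c => decide (c ≠ '.') | none => false)) = false := by
        rw [Bool.eq_false_iff]
        intro h
        obtain ⟨s, hs, hsp⟩ := List.any_eq_true.mp h
        have h4 := List.all_eq_true.mp hA s hs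
        rw [beq_iff_eq] at h4
        rw [h4] at hsp
        simp at hsp
      rw [h3]
      rfl

-- the whole equality, under Pre_
theorem filter_dot_only_eq_alt (xs : List String) (hpre : Pre_filter_dot_only xs) :
    filter_dot_only xs = filter_dot_only_alt xs := by
  have hpwN : (pvDN xs).Pairwise (· < ·) := List.pairwise_lt_range.filter _
  have hQ : ∀ k, k < (xs.headD "").toList.length →
      (!(PySem.Set.contains
        (xs.foldl (fun nd s =>
          (PySem.List.enumerate s.toList).foldl
            (fun nd p => if p.2 ≠ '.' then PySem.Set.add nd p.1 else nd) nd)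
          PySem.Set.empty) ((k : Nat) : Int)))
        = xs.all (fun s => s.toList[k]? == some '.') := by
    intro k hk
    rw [contains_outer_fold]
    have hempty : PySem.Set.contains (PySem.Set.empty : PySem.Set Int) ((k : Nat) : Int) = false := by
      rfl
    rw [hempty, Bool.false_or]
    have hany : (xs.any (fun s =>
          (PySem.List.enumerate s.toList).any (fun p => p.2 ≠ '.' && p.1 == ((k : Nat) : Int))))
        = xs.any (fun s => match s.toList[k]? with
            | some c => decide (c ≠ '.') | none => false) :=
      List.any_congr rfl (fun s => any_enumerate_eq s.toList k)
    rw [hany, colQ xs hpre k hk, Bool.not_not]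
  cases xs with
  | nil => exact absurd rfl hpre.1
  | cons x0 xt =>
    show (_, _) = (_, _)
    simp only [filter_dot_only, filter_dot_only_alt]
    have hhead : ((x0 :: xt).headD "") = x0 := rfl
    have hNeq : PySem.Str.len ((x0 :: xt).headD "") = ((x0.toList.length : Nat) : Int) := by
      rw [hhead, PySem.Str.len_eq]
    rw [hNeq]
    have hdotA : (PySem.List.pyRange 0 ((x0.toList.length : Nat) : Int) 1).foldl
        (fun acc k => if pvAllPoints (x0 :: xt) k then acc ++ [k] else acc) []
        = (pvDN (x0 :: xt)).map (fun (n : Nat) => (n : Int)) := by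
      rw [A_dots (x0 :: xt) x0.toList.length]
      rfl
    have hdotB : (PySem.List.pyRange 0 ((x0.toList.length : Nat) : Int) 1).filter
        (fun k => !(PySem.Set.contains
          ((x0 :: xt).foldl (fun nd s =>
            (PySem.List.enumerate s.toList).foldl
              (fun nd p => if p.2 ≠ '.' then PySem.Set.add nd p.1 else nd) nd)
            PySem.Set.empty) k))
        = (pvDN (x0 :: xt)).map (fun (n : Nat) => (n : Int)) := by
      rw [PySem.List.pyRange_zero_natCast, List.filter_map]
      congr 1
      apply List.filter_congr
      intro k hk
      exact hQ k (List.mem_range.mp hk)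
    rw [hdotA, hdotB, Prod.mk.injEq]
    refine ⟨rfl, ?_⟩
    rw [PySem.List.foldl_append_singleton_eq_map, PySem.List.foldl_append_singleton_eq_map,
      List.nil_append, List.nil_append]
    apply List.map_congr_left
    intro s _
    exact row_eq s (pvDN (x0 :: xt)) hpwN

-- ===== VERDICT (by name: the statement is the Claim_ definition above) =====
theorem filter_dot_only_spec : Claim_equal_filter_dot_only := by
  intro xs _ hpre
  unfold Spec_filter_dot_only
  exact filter_dot_only_eq_alt xs hpre
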